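-- pv_equiv track=rewrite | github.com/pppaal/saju-astro-chat | backend_ai/app/saju_astro_rag.py | _has_edge_columns
-- ===== SOURCE A (Python) =====
-- from typing import Dict, List, Optional, Tuple
--
-- _EDGE_SRC_FIELDS = ("src", "source", "source_id", "source_iching", "from", "base_ganji")
--
-- _EDGE_DST_FIELDS = ("dst", "target", "target_id", "target_tarot", "to", "flow_ganji")
--
-- def _has_edge_columns(headers: List[str]) -> bool:
--     header_set = {h.lower() for h in headers}
--     has_src = any(h in header_set for h in _EDGE_SRC_FIELDS) or any(
--         h.startswith("source_") or h.startswith("src_") for h in header_set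
--     )
--     has_dst = any(h in header_set for h in _EDGE_DST_FIELDS) or any(
--         h.startswith("target_") or h.startswith("dst_") for h in header_set
--     )
--     return has_src and has_dst
-- ===== SOURCE B (Python) =====
-- from typing import Dict, List, Optional, Tuple
--
-- _EDGE_SRC_FIELDS = ("src", "source", "source_id", "source_iching", "from", "base_ganji")
--
-- _EDGE_DST_FIELDS = ("dst", "target", "target_id", "target_tarot", "to", "flow_ganji")
--
-- def _has_edge_columns(headers: List[str]) -> bool:
--     has_src = False
--     has_dst = False
--     for h in headers:
--         hl = h.lower()
--         has_src = has_src or hl in _EDGE_SRC_FIELDS or hl.startswith("source_") or hl.startswith("src_")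
--         has_dst = has_dst or hl in _EDGE_DST_FIELDS or hl.startswith("target_") or hl.startswith("dst_")
--         if has_src and has_dst:
--             break
--     return has_src and has_dst
-- ===== Notes on version B (the rewrite author's own statement) =====
-- stated objective: alternative
-- what changed: B replaces A's build-a-lowercased-set-then-four-separate-any()-scans with one combined pass over the headers maintaining two flags (with early exit once both hold), so no intermediate set is materialised.
import Mathlib
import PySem

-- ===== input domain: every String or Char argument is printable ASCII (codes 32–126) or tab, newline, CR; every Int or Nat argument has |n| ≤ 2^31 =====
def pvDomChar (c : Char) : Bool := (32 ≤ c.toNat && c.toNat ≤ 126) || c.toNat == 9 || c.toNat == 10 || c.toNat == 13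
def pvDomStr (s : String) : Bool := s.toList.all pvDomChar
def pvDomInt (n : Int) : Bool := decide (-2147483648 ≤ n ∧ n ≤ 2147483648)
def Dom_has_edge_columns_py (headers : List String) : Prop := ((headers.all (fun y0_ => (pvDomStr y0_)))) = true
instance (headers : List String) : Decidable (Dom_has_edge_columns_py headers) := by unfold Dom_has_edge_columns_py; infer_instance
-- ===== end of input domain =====

-- B replaces A's lowercased-set construction plus four separate any() scans with a single
-- pass over the headers maintaining two flags (early exit once both hold); same cost class.

-- ===== PORT A =====
def pvSrcFields : List String := ["src", "source", "source_id", "source_iching", "from", "base_ganji"]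
def pvDstFields : List String := ["dst", "target", "target_id", "target_tarot", "to", "flow_ganji"]

def has_edge_columns_py (headers : List String) : Bool :=
  let headerSet : PySem.Set String := PySem.Set.ofList (headers.map PySem.Str.lower)
  let hasSrc :=
    pvSrcFields.any (fun h => PySem.Set.contains headerSet h) ||
    headerSet.any (fun h => PySem.Str.startswith h "source_" || PySem.Str.startswith h "src_")
  let hasDst :=
    pvDstFields.any (fun h => PySem.Set.contains headerSet h) ||
    headerSet.any (fun h => PySem.Str.startswith h "target_" || PySem.Str.startswith h "dst_")
  hasSrc && hasDst

-- ===== PORT B =====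
def pvAltLoop : List String → Bool → Bool → Bool
  | [], hasSrc, hasDst => hasSrc && hasDst
  | h :: rest, hasSrc, hasDst =>
    let hl := PySem.Str.lower h
    let hasSrc := hasSrc || pvSrcFields.contains hl ||
      PySem.Str.startswith hl "source_" || PySem.Str.startswith hl "src_"
    let hasDst := hasDst || pvDstFields.contains hl ||
      PySem.Str.startswith hl "target_" || PySem.Str.startswith hl "dst_"
    if hasSrc && hasDst then hasSrc && hasDst else pvAltLoop rest hasSrc hasDst

def has_edge_columns_py_alt (headers : List String) : Bool :=
  pvAltLoop headers false false

-- ===== PRECONDITION & SPEC =====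
def Spec_has_edge_columns_py (headers : List String) (out : Bool) : Prop := out = has_edge_columns_py_alt headers
instance (headers : List String) (out : Bool) : Decidable (Spec_has_edge_columns_py headers out) := by unfold Spec_has_edge_columns_py; infer_instance

-- ===== CLAIM (what is proved, stated in full; the proofs are below) =====
def Claim_equal_has_edge_columns_py : Prop := ∀ (headers : List String), Dom_has_edge_columns_py headers → Spec_has_edge_columns_py headers (has_edge_columns_py headers)

-- ===== LEMMAS AND PROOFS =====

def pvIsSrc (hl : String) : Bool :=
  pvSrcFields.contains hl || PySem.Str.startswith hl "source_" || PySem.Str.startswith hl "src_"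
def pvIsDst (hl : String) : Bool :=
  pvDstFields.contains hl || PySem.Str.startswith hl "target_" || PySem.Str.startswith hl "dst_"

lemma pvAltLoop_eq (l : List String) (hs hd : Bool) :
    pvAltLoop l hs hd =
      ((hs || l.any (fun h => pvIsSrc (PySem.Str.lower h))) &&
       (hd || l.any (fun h => pvIsDst (PySem.Str.lower h)))) := by
  induction l generalizing hs hd with
  | nil => simp [pvAltLoop]
  | cons h rest ih =>
    simp only [pvAltLoop, pvIsSrc, pvIsDst, List.any_cons, ih]
    cases hs <;> cases hd <;>
      cases hS : pvSrcFields.contains (PySem.Str.lower h) <;>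
      cases hD : pvDstFields.contains (PySem.Str.lower h) <;>
      cases h1 : PySem.Str.startswith (PySem.Str.lower h) "source_" <;>
      cases h2 : PySem.Str.startswith (PySem.Str.lower h) "src_" <;>
      cases h3 : PySem.Str.startswith (PySem.Str.lower h) "target_" <;>
      cases h4 : PySem.Str.startswith (PySem.Str.lower h) "dst_" <;>
      simp

lemma pvScan (fields : List String) (pre1 pre2 : String) (headers : List String) :
    (fields.any (fun h => PySem.Set.contains (PySem.Set.ofList (headers.map PySem.Str.lower)) h) ||
     (PySem.Set.ofList (headers.map PySem.Str.lower)).any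
       (fun h => PySem.Str.startswith h pre1 || PySem.Str.startswith h pre2))
    = headers.any (fun h => fields.contains (PySem.Str.lower h) ||
        PySem.Str.startswith (PySem.Str.lower h) pre1 ||
        PySem.Str.startswith (PySem.Str.lower h) pre2) := by
  rw [Bool.eq_iff_iff]
  simp only [Bool.or_eq_true, List.any_eq_true, PySem.Set.contains_iff,
    PySem.Set.mem_ofList, List.mem_map, List.contains_iff_exists_mem_beq, beq_iff_eq]
  aesop

lemma pvA_eq (headers : List String) :
    has_edge_columns_py headers =
      ((headers.any (fun h => pvIsSrc (PySem.Str.lower h))) &&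
       (headers.any (fun h => pvIsDst (PySem.Str.lower h)))) := by
  simp only [has_edge_columns_py]
  rw [pvScan, pvScan]
  simp only [pvIsSrc, pvIsDst]

-- ===== VERDICT (by name: the statement is the Claim_ definition above) =====
theorem has_edge_columns_py_spec : Claim_equal_has_edge_columns_py := by
  intro headers _
  unfold Spec_has_edge_columns_py has_edge_columns_py_alt
  rw [pvA_eq, pvAltLoop_eq]
  simp
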